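-- pv_equiv track=rewrite | github.com/silverat/Numerologia-Cabalistica-Python | Numerologia.py | relacinterval
-- ===== SOURCE A (Python) =====
-- def contarep(listaaver, indice):
--     N = int(0)
--     for k in range(0, 9):
--         if k != indice:
--             if listaaver[k] == listaaver[indice]:
--                 N = N + 1
--     return N
--
-- def lisPosMaiores(listaaver):
--     maior = listaaver[0]
--     lista = list()
--     for k in range(1, 9):
--         if maior < listaaver[k]:
--             maior = listaaver[k]
--     for k in range(0, 9):
--         if listaaver[k] == maior:
--             lista.append(int(k))
--     return lista
--
-- def retiradup(listasaida):
--     listaret = list()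
--     for cada in listasaida:
--         if cada not in listaret:
--             listaret.append(cada)
--     return listaret
--
-- def relacinterval(listareznum):
--     listapos = list()
--     listamaiores = lisPosMaiores(listareznum)
--
--     for cada in listamaiores:
--         for j in range(0, 9):
--             if cada != j:
--                 N = contarep(listareznum, j)
--
--                 if listareznum[cada] >= 2 * N and listareznum[cada] != 0:
--                     listapos.append(int(cada + 1))
--     listapos = retiradup(listapos)
--     return (listapos)
-- ===== SOURCE B (Python) =====
-- def relacinterval(listareznum):
--     vals = [listareznum[k] for k in range(9)]
--     maxv = max(vals)
--     if maxv == 0: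
--         return []
--     freq = {}
--     for v in vals:
--         freq[v] = freq.get(v, 0) + 1
--     # two smallest duplicate-counts c_j = freq[vals[j]] - 1, with the index of a minimum
--     j1, m1, m2 = -1, None, None
--     for j in range(9):
--         cj = freq[vals[j]] - 1
--         if m1 is None or cj < m1:
--             j1, m1, m2 = j, cj, m1
--         elif m2 is None or cj < m2:
--             m2 = cj
--     out = []
--     for i in range(9):
--         if vals[i] == maxv and maxv >= 2 * (m2 if i == j1 else m1):
--             out.append(i + 1)
--     return out
-- ===== Notes on version B (the rewrite author's own statement) =====
-- stated objective: alternative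
-- what changed: Replaces A's per-position existential rescan (contarep inside a nested loop, then retiradup dedup) by precomputing the two smallest duplicate-counts with the index of one minimum, so each position is decided by a single O(1) comparison against the appropriate minimum and no inner loop or dedup pass exists.
import Mathlib
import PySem

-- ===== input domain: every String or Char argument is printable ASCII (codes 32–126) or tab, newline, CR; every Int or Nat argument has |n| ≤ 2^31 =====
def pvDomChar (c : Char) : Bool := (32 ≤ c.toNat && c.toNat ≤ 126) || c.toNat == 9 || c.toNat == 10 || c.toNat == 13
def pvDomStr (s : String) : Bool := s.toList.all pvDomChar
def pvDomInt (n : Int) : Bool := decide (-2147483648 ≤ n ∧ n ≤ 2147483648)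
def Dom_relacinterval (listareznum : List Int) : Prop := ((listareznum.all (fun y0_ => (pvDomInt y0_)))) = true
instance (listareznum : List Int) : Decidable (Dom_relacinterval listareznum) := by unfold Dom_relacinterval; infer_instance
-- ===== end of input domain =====

-- B replaces A's nested per-position rescans (contarep) and dedup pass by one counting pass
-- plus the two smallest duplicate-counts, so each position is decided by one comparison.

-- ===== PORT A =====
def contarep (listaaver : List Int) (indice : Int) : Int :=
  (PySem.List.pyRange 0 9 1).foldl (fun N k =>
    if k ≠ indice then
      if PySem.List.pyGetD listaaver k 0 = PySem.List.pyGetD listaaver indice 0 then N + 1 else N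
    else N) 0

def lisPosMaiores (listaaver : List Int) : List Int :=
  let maior := (PySem.List.pyRange 1 9 1).foldl (fun maior k =>
    if maior < PySem.List.pyGetD listaaver k 0 then PySem.List.pyGetD listaaver k 0 else maior)
    (PySem.List.pyGetD listaaver 0 0)
  (PySem.List.pyRange 0 9 1).foldl (fun lista k =>
    if PySem.List.pyGetD listaaver k 0 = maior then lista ++ [k] else lista) []

def retiradup (listasaida : List Int) : List Int :=
  listasaida.foldl (fun listaret cada =>
    if listaret.contains cada then listaret else listaret ++ [cada]) []

def relacinterval (listareznum : List Int) : List Int :=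
  let listamaiores := lisPosMaiores listareznum
  let listapos := listamaiores.foldl (fun listapos cada =>
    (PySem.List.pyRange 0 9 1).foldl (fun listapos j =>
      if cada ≠ j then
        let N := contarep listareznum j
        if PySem.List.pyGetD listareznum cada 0 ≥ 2 * N ∧ PySem.List.pyGetD listareznum cada 0 ≠ 0 then
          listapos ++ [cada + 1]
        else listapos
      else listapos) listapos) []
  retiradup listapos

-- ===== PORT B =====
-- loop body of B's two-minimum pass ('if m1 is None or cj < m1: … elif m2 is None or cj < m2: …')
def pvStep (c : Int → Int) (s : Int × Option Int × Option Int) (j : Int) : Int × Option Int × Option Int :=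
  let cj := c j
  match s with
  | (j1, m1, m2) =>
    if m1.isNone || decide (cj < m1.getD 0) then (j, some cj, m1)
    else if m2.isNone || decide (cj < m2.getD 0) then (j1, m1, some cj)
    else (j1, m1, m2)

def relacinterval_alt (listareznum : List Int) : List Int :=
  let vals := (PySem.List.pyRange 0 9 1).map (fun k => PySem.List.pyGetD listareznum k 0)
  let maxv := (PySem.List.max? vals (fun x => x)).getD 0
  if maxv = 0 then []
  else
    let freq := vals.foldl (fun d v => d.insert v (d.getD v 0 + 1)) (PySem.Dict.empty (κ := Int) (ν := Int))
    let st := (PySem.List.pyRange 0 9 1).foldl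
      (pvStep (fun j => freq.getD (PySem.List.pyGetD vals j 0) 0 - 1)) ((-1 : Int), none, none)
    (PySem.List.pyRange 0 9 1).foldl (fun out i =>
      if PySem.List.pyGetD vals i 0 = maxv ∧
          maxv ≥ 2 * ((if i = st.1 then st.2.2 else st.2.1).getD 0) then
        out ++ [i + 1]
      else out) []

-- ===== PRECONDITION & SPEC =====
-- Pre_ excludes exactly the inputs with fewer than 9 elements, on which A raises IndexError.
def Pre_relacinterval (listareznum : List Int) : Prop := 9 ≤ listareznum.length
instance (listareznum : List Int) : Decidable (Pre_relacinterval listareznum) := by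
  unfold Pre_relacinterval; infer_instance

def pvWitness_relacinterval : List Int := [3, 1, 4, 1, 5, 9, 2, 6, 5]

def Spec_relacinterval (listareznum : List Int) (out : List Int) : Prop := out = relacinterval_alt listareznum
instance (listareznum : List Int) (out : List Int) : Decidable (Spec_relacinterval listareznum out) := by unfold Spec_relacinterval; infer_instance

-- ===== CLAIM (what is proved, stated in full; the proofs are below) =====
def Claim_equal_relacinterval : Prop := ∀ (listareznum : List Int), Dom_relacinterval listareznum → Pre_relacinterval listareznum → Spec_relacinterval listareznum (relacinterval listareznum)

-- ===== LEMMAS AND PROOFS =====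

-- the first 9 elements of the input
def pvV (l : List Int) : List Int := (PySem.List.pyRange 0 9 1).map (fun k => PySem.List.pyGetD l k 0)

-- max of the first 9 elements
def pvM (l : List Int) : Int := (PySem.List.max? (pvV l) (fun x => x)).getD 0

-- the common closed form both ports are reduced to: position i qualifies
def pvGood (l : List Int) (i : Int) : Bool :=
  decide (PySem.List.pyGetD l i 0 = pvM l) && decide (pvM l ≠ 0) &&
    (PySem.List.pyRange 0 9 1).any (fun j =>
      decide (j ≠ i) && decide (pvM l ≥ 2 * (((pvV l).count (PySem.List.pyGetD l j 0) : Int) - 1)))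

def pvSpec (l : List Int) : List Int :=
  ((PySem.List.pyRange 0 9 1).filter (fun i => pvGood l i)).map (fun i => i + 1)

-- ---- B's port equals the closed form ----

-- duplicate count used by both the closed form and B
def pvC (l : List Int) (j : Int) : Int := ((pvV l).count (PySem.List.pyGetD l j 0) : Int) - 1

-- invariant of B's two-minimum loop over the processed prefix p
def pvInv (c : Int → Int) (p : List Int) (s : Int × Option Int × Option Int) : Prop :=
  match s with
  | (_, none, m2) => p = [] ∧ m2 = none
  | (j1, some m1, none) => j1 ∈ p ∧ c j1 = m1 ∧ (∀ j ∈ p, m1 ≤ c j) ∧ (∀ j ∈ p, j = j1)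
  | (j1, some m1, some v) => j1 ∈ p ∧ c j1 = m1 ∧ (∀ j ∈ p, m1 ≤ c j) ∧
      (∃ j ∈ p, j ≠ j1 ∧ c j = v) ∧ (∀ j ∈ p, j ≠ j1 → v ≤ c j)

theorem pvStep_congr (c c' : Int → Int) (s : Int × Option Int × Option Int) (j : Int)
    (h : c j = c' j) : pvStep c s j = pvStep c' s j := by
  simp [pvStep, h]

theorem pvInv_step (c : Int → Int) (p : List Int) (s : Int × Option Int × Option Int) (j : Int)
    (hj : j ∉ p) (h : pvInv c p s) : pvInv c (p ++ [j]) (pvStep c s j) := by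
  obtain ⟨j1, m1, m2⟩ := s
  match m1 with
  | none =>
    obtain ⟨hp, hm2⟩ := h
    subst hp; subst hm2
    have hstep : pvStep c ((j1, none, none) : Int × Option Int × Option Int) j
        = (j, some (c j), none) := by simp [pvStep]
    rw [hstep]
    exact ⟨by simp, rfl, by intro k hk; simp at hk; subst hk; exact le_refl _,
      by intro k hk; simpa using hk⟩
  | some m1 =>
    match m2 with
    | none =>
      obtain ⟨hj1, hc, hmin, hall⟩ := h
      by_cases hlt : c j < m1
      · -- new minimum; previous minimum becomes the second minimum
        have hstep : pvStep c ((j1, some m1, none) : Int × Option Int × Option Int) j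
            = (j, some (c j), some m1) := by simp [pvStep, hlt]
        rw [hstep]
        refine ⟨by simp, rfl, ?_, ⟨j1, by simp [hj1], ?_, hc⟩, ?_⟩
        · intro k hk
          rcases List.mem_append.mp hk with hk | hk
          · exact le_trans hlt.le (hmin k hk)
          · simp at hk; subst hk; exact le_refl _
        · intro e; subst e; exact hj hj1
        · intro k hk hkj
          rcases List.mem_append.mp hk with hk | hk
          · exact hmin k hk
          · simp at hk; exact absurd hk hkj
      · -- first second-minimum
        have hstep : pvStep c ((j1, some m1, none) : Int × Option Int × Option Int) j
            = (j1, some m1, some (c j)) := by simp [pvStep, hlt]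
        rw [hstep]
        refine ⟨by simp [hj1], hc, ?_, ⟨j, by simp, ?_, rfl⟩, ?_⟩
        · intro k hk
          rcases List.mem_append.mp hk with hk | hk
          · exact hmin k hk
          · simp at hk; subst hk; exact le_of_not_gt hlt
        · intro e; subst e; exact hj hj1
        · intro k hk hkj1
          rcases List.mem_append.mp hk with hk | hk
          · exact absurd (hall k hk) hkj1
          · simp at hk; subst hk; exact le_refl _
    | some v =>
      obtain ⟨hj1, hc, hmin, ⟨k0, hk0, hk0j1, hk0c⟩, hsnd⟩ := h
      by_cases hlt : c j < m1
      · have hstep : pvStep c ((j1, some m1, some v) : Int × Option Int × Option Int) j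
            = (j, some (c j), some m1) := by simp [pvStep, hlt]
        rw [hstep]
        refine ⟨by simp, rfl, ?_, ⟨j1, by simp [hj1], ?_, hc⟩, ?_⟩
        · intro k hk
          rcases List.mem_append.mp hk with hk | hk
          · exact le_trans hlt.le (hmin k hk)
          · simp at hk; subst hk; exact le_refl _
        · intro e; subst e; exact hj hj1
        · intro k hk hkj
          rcases List.mem_append.mp hk with hk | hk
          · exact hmin k hk
          · simp at hk; exact absurd hk hkj
      · by_cases hlt2 : c j < v
        · have hstep : pvStep c ((j1, some m1, some v) : Int × Option Int × Option Int) j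
              = (j1, some m1, some (c j)) := by simp [pvStep, hlt, hlt2]
          rw [hstep]
          refine ⟨by simp [hj1], hc, ?_, ⟨j, by simp, ?_, rfl⟩, ?_⟩
          · intro k hk
            rcases List.mem_append.mp hk with hk | hk
            · exact hmin k hk
            · simp at hk; subst hk; exact le_of_not_gt hlt
          · intro e; subst e; exact hj hj1
          · intro k hk hkj1
            rcases List.mem_append.mp hk with hk | hk
            · exact le_trans hlt2.le (hsnd k hk hkj1)
            · simp at hk; subst hk; exact le_refl _
        · have hstep : pvStep c ((j1, some m1, some v) : Int × Option Int × Option Int) j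
              = (j1, some m1, some v) := by simp [pvStep, hlt, hlt2]
          rw [hstep]
          refine ⟨by simp [hj1], hc, ?_, ⟨k0, by simp [hk0], hk0j1, hk0c⟩, ?_⟩
          · intro k hk
            rcases List.mem_append.mp hk with hk | hk
            · exact hmin k hk
            · simp at hk; subst hk; exact le_of_not_gt hlt
          · intro k hk hkj1
            rcases List.mem_append.mp hk with hk | hk
            · exact hsnd k hk hkj1
            · simp at hk; subst hk; exact le_of_not_gt hlt2

theorem pvInv_foldl (c : Int → Int) (r : List Int) : ∀ (p : List Int) (s : Int × Option Int × Option Int),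
    pvInv c p s → (∀ x ∈ r, x ∉ p) → r.Nodup →
    pvInv c (p ++ r) (r.foldl (pvStep c) s) := by
  induction r with
  | nil => intro p s h _ _; simpa using h
  | cons x t ih =>
    intro p s h hdisj hnd
    have h1 := pvInv_step c p s x (hdisj x List.mem_cons_self) h
    have h2 := ih (p ++ [x]) (pvStep c s x) h1 ?_ (List.nodup_cons.mp hnd).2
    · rw [List.foldl_cons]
      rwa [List.append_assoc, List.singleton_append] at h2
    · intro y hy
      rw [List.mem_append]
      rintro (hyp | hyx)
      · exact hdisj y (List.mem_cons_of_mem _ hy) hyp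
      · simp at hyx; subst hyx; exact (List.nodup_cons.mp hnd).1 hy

-- after the full range, both minima exist with their characterising properties
theorem pv_final (c : Int → Int) :
    ∃ j1 m1 m2, (PySem.List.pyRange 0 9 1).foldl (pvStep c) ((-1 : Int), none, none) = (j1, some m1, some m2) ∧
      j1 ∈ PySem.List.pyRange 0 9 1 ∧ c j1 = m1 ∧
      (∀ j ∈ PySem.List.pyRange 0 9 1, m1 ≤ c j) ∧
      (∃ j ∈ PySem.List.pyRange 0 9 1, j ≠ j1 ∧ c j = m2) ∧
      (∀ j ∈ PySem.List.pyRange 0 9 1, j ≠ j1 → m2 ≤ c j) := by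
  have h := pvInv_foldl c (PySem.List.pyRange 0 9 1) [] ((-1 : Int), none, none)
    (by constructor <;> rfl) (by simp) (PySem.List.nodup_pyRange_one 0 9)
  rw [List.nil_append] at h
  have h0 : (0 : Int) ∈ PySem.List.pyRange 0 9 1 := by rw [PySem.List.mem_pyRange_one]; omega
  have h1 : (1 : Int) ∈ PySem.List.pyRange 0 9 1 := by rw [PySem.List.mem_pyRange_one]; omega
  rcases hst : (PySem.List.pyRange 0 9 1).foldl (pvStep c) ((-1 : Int), none, none) with ⟨j1, m1, m2⟩
  rw [hst] at h
  cases m1 with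
  | none =>
    exfalso
    rw [show pvInv c (PySem.List.pyRange 0 9 1) ((j1, none, m2) : Int × Option Int × Option Int)
      = (PySem.List.pyRange 0 9 1 = [] ∧ m2 = none) from rfl] at h
    rw [h.1] at h0
    cases h0
  | some m1 =>
    cases m2 with
    | none =>
      exfalso
      obtain ⟨_, _, _, hall⟩ := h
      have e0 := hall 0 h0
      have e1 := hall 1 h1
      omega
    | some v =>
      obtain ⟨ha, hb, hc, hd, he⟩ := h
      exact ⟨j1, m1, v, rfl, ha, hb, hc, hd, he⟩

-- the single comparison against the appropriate minimum decides the existential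
theorem pv_twomin (c : Int → Int) (M i : Int) :
    (M ≥ 2 * ((if i = ((PySem.List.pyRange 0 9 1).foldl (pvStep c) ((-1 : Int), none, none)).1
        then ((PySem.List.pyRange 0 9 1).foldl (pvStep c) ((-1 : Int), none, none)).2.2
        else ((PySem.List.pyRange 0 9 1).foldl (pvStep c) ((-1 : Int), none, none)).2.1).getD 0)) ↔
      ∃ j ∈ PySem.List.pyRange 0 9 1, j ≠ i ∧ M ≥ 2 * c j := by
  obtain ⟨j1, m1, m2, hst, hj1, hcj1, hmin, ⟨k0, hk0, hk0j1, hk0c⟩, hsnd⟩ := pv_final c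
  rw [hst]
  by_cases hij : i = j1
  · rw [if_pos (by rw [hij])]
    simp only [Option.getD_some]
    constructor
    · intro h; exact ⟨k0, hk0, by rw [hij]; exact hk0j1, by omega⟩
    · rintro ⟨j, hjR, hji, hj2⟩
      have := hsnd j hjR (by rw [← hij]; exact hji)
      omega
  · rw [if_neg (by simpa using hij)]
    simp only [Option.getD_some]
    constructor
    · intro h
      exact ⟨j1, hj1, fun e => hij e.symm, by omega⟩
    · rintro ⟨j, hjR, _, hj2⟩
      have := hmin j hjR
      omega

set_option maxHeartbeats 1000000 in
theorem pv_alt_eq_spec (l : List Int) : relacinterval_alt l = pvSpec l := by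
  unfold relacinterval_alt
  dsimp only
  have hvals : (PySem.List.pyRange 0 9 1).map (fun k => PySem.List.pyGetD l k 0) = pvV l := rfl
  have hmax : (PySem.List.max? (pvV l) (fun x => x)).getD 0 = pvM l := rfl
  rw [hvals, hmax]
  by_cases h0 : pvM l = 0
  · rw [if_pos h0]
    unfold pvSpec
    have : (PySem.List.pyRange 0 9 1).filter (fun i => pvGood l i) = [] := by
      apply List.filter_eq_nil_iff.mpr
      intro i _
      simp [pvGood, h0]
    rw [this, List.map_nil]
  · rw [if_neg h0]
    -- the dict of counts is the count function on the first 9 values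
    have hfreq : ∀ j ∈ PySem.List.pyRange 0 9 1,
        ((pvV l).foldl (fun d v => d.insert v (d.getD v 0 + 1)) (PySem.Dict.empty (κ := Int) (ν := Int))).getD
          (PySem.List.pyGetD (pvV l) j 0) 0 - 1 = pvC l j := by
      intro j hj
      rw [PySem.List.mem_pyRange_one] at hj
      have hidx : PySem.List.pyGetD (pvV l) j 0 = PySem.List.pyGetD l j 0 :=
        PySem.List.pyGetD_map_pyRange_of_nonneg _ _ _ _ hj.1 hj.2
      rw [hidx]
      simp only [PySem.Dict.getD_foldl_insert_add_one, PySem.Dict.getD_empty, zero_add]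
      rfl
    have hst : (PySem.List.pyRange 0 9 1).foldl
        (pvStep (fun j => ((pvV l).foldl (fun d v => d.insert v (d.getD v 0 + 1)) (PySem.Dict.empty (κ := Int) (ν := Int))).getD (PySem.List.pyGetD (pvV l) j 0) 0 - 1))
        ((-1 : Int), none, none)
        = (PySem.List.pyRange 0 9 1).foldl (pvStep (pvC l)) ((-1 : Int), none, none) := by
      apply PySem.List.foldl_congr_mem'
      intro j hj s
      exact pvStep_congr _ _ _ _ (hfreq j hj)
    rw [hst]
    have hbody := PySem.List.foldl_congr_mem'
      (l := PySem.List.pyRange 0 9 1) (init := ([] : List Int))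
      (f := fun out i =>
        if PySem.List.pyGetD (pvV l) i 0 = pvM l ∧
            pvM l ≥ 2 * ((if i = ((PySem.List.pyRange 0 9 1).foldl (pvStep (pvC l)) ((-1 : Int), none, none)).1
              then ((PySem.List.pyRange 0 9 1).foldl (pvStep (pvC l)) ((-1 : Int), none, none)).2.2
              else ((PySem.List.pyRange 0 9 1).foldl (pvStep (pvC l)) ((-1 : Int), none, none)).2.1).getD 0) then
          out ++ [i + 1]
        else out)
      (g := fun out i => if pvGood l i then out ++ [i + 1] else out)
      ?_
    · rw [hbody, PySem.List.foldl_append_if (p := fun i => pvGood l i) (f := fun i => i + 1),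
        List.nil_append]
      rfl
    · intro i hi out
      dsimp only
      have hiR := hi
      rw [PySem.List.mem_pyRange_one] at hi
      have hvi : PySem.List.pyGetD (pvV l) i 0 = PySem.List.pyGetD l i 0 :=
        PySem.List.pyGetD_map_pyRange_of_nonneg _ _ _ _ hi.1 hi.2
      have hcond : (PySem.List.pyGetD (pvV l) i 0 = pvM l ∧
          pvM l ≥ 2 * ((if i = ((PySem.List.pyRange 0 9 1).foldl (pvStep (pvC l)) ((-1 : Int), none, none)).1
            then ((PySem.List.pyRange 0 9 1).foldl (pvStep (pvC l)) ((-1 : Int), none, none)).2.2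
            else ((PySem.List.pyRange 0 9 1).foldl (pvStep (pvC l)) ((-1 : Int), none, none)).2.1).getD 0))
          ↔ pvGood l i = true := by
        rw [pv_twomin (pvC l) (pvM l) i, hvi]
        simp only [pvGood, Bool.and_eq_true, decide_eq_true_eq, List.any_eq_true]
        constructor
        · rintro ⟨hv, j, hjR, hji, hge⟩
          exact ⟨⟨hv, h0⟩, j, hjR, by simpa [pvC] using ⟨hji, hge⟩⟩
        · rintro ⟨⟨hv, _⟩, j, hjR, hj⟩
          exact ⟨hv, j, hjR, hj.1, by simpa [pvC] using hj.2⟩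
      by_cases hA : (PySem.List.pyGetD (pvV l) i 0 = pvM l ∧
          pvM l ≥ 2 * ((if i = ((PySem.List.pyRange 0 9 1).foldl (pvStep (pvC l)) ((-1 : Int), none, none)).1
            then ((PySem.List.pyRange 0 9 1).foldl (pvStep (pvC l)) ((-1 : Int), none, none)).2.2
            else ((PySem.List.pyRange 0 9 1).foldl (pvStep (pvC l)) ((-1 : Int), none, none)).2.1).getD 0))
      · rw [if_pos hA, if_pos (hcond.mp hA)]
      · rw [if_neg hA, if_neg (fun hB => hA (hcond.mpr hB))]

-- ---- A's port equals the closed form ----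

-- dropping one fixed element j from a count (contarep skips index j)
theorem pv_countP_ne_and (r : List Int) (j : Int) (p : Int → Bool) (hj : j ∈ r) (hnd : r.Nodup)
    (hpj : p j = true) :
    r.countP (fun k => decide (k ≠ j) && p k) + 1 = r.countP p := by
  induction r with
  | nil => cases hj
  | cons x t ih =>
    rw [List.countP_cons, List.countP_cons]
    rcases List.nodup_cons.mp hnd with ⟨hx, ht⟩
    by_cases hxj : x = j
    · subst hxj
      have hfun : ∀ a ∈ t, ((decide (a ≠ x) && p a) = true ↔ p a = true) := by
        intro a ha
        have : a ≠ x := fun e => hx (e ▸ ha)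
        simp [this]
      rw [List.countP_congr hfun]
      simp [hpj]
    · have hjt : j ∈ t := by
        rcases List.mem_cons.mp hj with h | h
        · exact absurd h.symm hxj
        · exact h
      have := ih hjt ht
      by_cases hpx : p x = true
      · simp [hxj, hpx] at *; omega
      · simp at hpx; simp [hpx] at *; omega

theorem contarep_eq (l : List Int) (j : Int) (h1 : 0 ≤ j) (h2 : j < 9) :
    contarep l j = ((pvV l).count (PySem.List.pyGetD l j 0) : Int) - 1 := by
  unfold contarep
  have hcongr := PySem.List.foldl_congr_mem'
    (l := PySem.List.pyRange 0 9 1) (init := (0 : Int))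
    (f := fun N k =>
      if k ≠ j then
        if PySem.List.pyGetD l k 0 = PySem.List.pyGetD l j 0 then N + 1 else N
      else N)
    (g := fun N k =>
      if (k ≠ j ∧ PySem.List.pyGetD l k 0 = PySem.List.pyGetD l j 0) then N + 1 else N)
    (by intro x hx N; dsimp only; split_ifs <;> tauto)
  rw [hcongr, PySem.List.foldl_ite_add_one]
  have hcount : (pvV l).count (PySem.List.pyGetD l j 0)
      = (PySem.List.pyRange 0 9 1).countP
          (fun k => decide (PySem.List.pyGetD l k 0 = PySem.List.pyGetD l j 0)) := by
    unfold pvV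
    rw [List.count_eq_countP, List.countP_map]
    exact List.countP_congr (fun a _ => Iff.rfl)
  have hne := pv_countP_ne_and (PySem.List.pyRange 0 9 1) j
      (fun k => decide (PySem.List.pyGetD l k 0 = PySem.List.pyGetD l j 0))
      (by rw [PySem.List.mem_pyRange_one]; exact ⟨h1, h2⟩)
      (PySem.List.nodup_pyRange_one 0 9) (by simp)
  have : ((PySem.List.pyRange 0 9 1).countP
      (fun k => decide (k ≠ j) && decide (PySem.List.pyGetD l k 0 = PySem.List.pyGetD l j 0)))
      = (PySem.List.pyRange 0 9 1).countP
        (fun k => decide (k ≠ j ∧ PySem.List.pyGetD l k 0 = PySem.List.pyGetD l j 0)) := by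
    apply List.countP_congr; intro a _; simp
  rw [hcount, ← hne, ← this]
  push_cast
  ring

theorem pv_maior_eq (l : List Int) :
    (PySem.List.pyRange 1 9 1).foldl (fun maior k =>
      if maior < PySem.List.pyGetD l k 0 then PySem.List.pyGetD l k 0 else maior)
      (PySem.List.pyGetD l 0 0) = pvM l := by
  have hsplit : PySem.List.pyRange 0 9 1 = 0 :: PySem.List.pyRange 1 9 1 :=
    PySem.List.pyRange_one_cons (by norm_num)
  unfold pvM pvV
  rw [hsplit, List.map_cons, PySem.List.max?_id_cons, Option.getD_some, List.foldl_map]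
  apply PySem.List.foldl_congr_mem'
  intro x hx m
  dsimp only
  rcases lt_or_ge m (PySem.List.pyGetD l x 0) with h | h
  · simp [h, max_eq_right h.le]
  · simp [not_lt.mpr h, max_eq_left h]

theorem lisPosMaiores_eq (l : List Int) :
    lisPosMaiores l
      = (PySem.List.pyRange 0 9 1).filter (fun k => decide (PySem.List.pyGetD l k 0 = pvM l)) := by
  unfold lisPosMaiores
  rw [pv_maior_eq]
  rw [PySem.List.foldl_append_ite_eq_filter]
  simp

-- the condition A's inner j-loop tests for a fixed position cada
def pvQ (l : List Int) (cada j : Int) : Bool :=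
  decide (cada ≠ j) &&
    decide (PySem.List.pyGetD l cada 0 ≥ 2 * contarep l j ∧ PySem.List.pyGetD l cada 0 ≠ 0)

-- how many times A's inner loop appends cada + 1
def pvRep (l : List Int) (cada : Int) : Nat :=
  ((PySem.List.pyRange 0 9 1).filter (pvQ l cada)).length

theorem pv_inner_eq (l : List Int) (cada : Int) (acc : List Int) :
    (PySem.List.pyRange 0 9 1).foldl (fun listapos j =>
      if cada ≠ j then
        let N := contarep l j
        if PySem.List.pyGetD l cada 0 ≥ 2 * N ∧ PySem.List.pyGetD l cada 0 ≠ 0 then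
          listapos ++ [cada + 1]
        else listapos
      else listapos) acc = acc ++ List.replicate (pvRep l cada) (cada + 1) := by
  have hcongr := PySem.List.foldl_congr_mem'
    (l := PySem.List.pyRange 0 9 1) (init := acc)
    (f := fun listapos j =>
      if cada ≠ j then
        let N := contarep l j
        if PySem.List.pyGetD l cada 0 ≥ 2 * N ∧ PySem.List.pyGetD l cada 0 ≠ 0 then
          listapos ++ [cada + 1]
        else listapos
      else listapos)
    (g := fun listapos j =>
      if pvQ l cada j then listapos ++ [cada + 1] else listapos)
    (by intro x hx a; dsimp only [pvQ]; split_ifs <;> simp_all)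
  rw [hcongr, PySem.List.foldl_append_if (p := pvQ l cada) (f := fun _ => cada + 1)]
  unfold pvRep
  rw [List.map_const']

-- folding a run of m copies of x into a dedup accumulator adds x at most once
theorem pv_rep_contains (acc : List Int) (x : Int) (m : Nat) (hx : acc.contains x = true) :
    (List.replicate m x).foldl (fun s c => if s.contains c then s else s ++ [c]) acc = acc := by
  induction m with
  | zero => rfl
  | succ k ih => rw [List.replicate_succ, List.foldl_cons, if_pos hx]; exact ih

theorem pv_rep_fold (acc : List Int) (x : Int) (m : Nat) (hx : acc.contains x = false) :
    (List.replicate m x).foldl (fun s c => if s.contains c then s else s ++ [c]) acc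
      = if m = 0 then acc else acc ++ [x] := by
  cases m with
  | zero => rfl
  | succ k =>
    rw [List.replicate_succ, List.foldl_cons,
      if_neg (by simp only [hx]; exact Bool.false_ne_true), if_neg (Nat.succ_ne_zero k)]
    exact pv_rep_contains _ _ _ (by simp)

-- A's retiradup over blocks of repeated values keeps one copy of each nonempty block
theorem pv_dedup_flatMap (xs : List Int) (g : Int → Int) (n : Int → Nat) (acc : List Int)
    (hnd : (xs.map g).Nodup) (hacc : ∀ c ∈ xs, acc.contains (g c) = false) :
    (xs.flatMap (fun c => List.replicate (n c) (g c))).foldl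
        (fun s c => if s.contains c then s else s ++ [c]) acc
      = acc ++ (xs.filter (fun c => decide (n c ≠ 0))).map g := by
  induction xs generalizing acc with
  | nil => simp
  | cons c xs ih =>
    rw [List.flatMap_cons, List.foldl_append]
    rw [List.map_cons] at hnd
    rcases List.nodup_cons.mp hnd with ⟨hgc, hnd'⟩
    have hx : acc.contains (g c) = false := hacc c List.mem_cons_self
    rw [pv_rep_fold _ _ _ hx]
    by_cases h0 : n c = 0
    · rw [if_pos h0, List.filter_cons_of_neg (by simp [h0]), ih _ hnd'
        (fun d hd => hacc d (List.mem_cons_of_mem _ hd))]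
    · rw [if_neg h0, List.filter_cons_of_pos (by simp [h0]), ih _ hnd' ?_, List.map_cons]
      · simp
      · intro d hd
        have h1 : g d ∉ acc := by simpa using hacc d (List.mem_cons_of_mem _ hd)
        have h2 : g d ≠ g c := by
          intro e
          exact hgc (e ▸ List.mem_map_of_mem hd)
        simp [h1, h2]

-- A's per-position condition coincides with pvGood
theorem pv_cond_eq (l : List Int) (i : Int) :
    (decide (PySem.List.pyGetD l i 0 = pvM l) && decide (pvRep l i ≠ 0)) = pvGood l i := by
  by_cases hv : PySem.List.pyGetD l i 0 = pvM l
  · simp only [pvGood, hv, decide_true, Bool.true_and]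
    rw [Bool.eq_iff_iff]
    simp only [decide_eq_true_eq, Bool.and_eq_true, List.any_eq_true]
    constructor
    · intro h
      obtain ⟨a, ha⟩ := List.exists_mem_of_length_pos (Nat.pos_of_ne_zero h)
      rcases List.mem_filter.mp ha with ⟨haR, haQ⟩
      rcases PySem.List.mem_pyRange_one.mp haR with ⟨ha0, ha9⟩
      simp only [pvQ, Bool.and_eq_true, decide_eq_true_eq] at haQ
      rcases haQ with ⟨hne, hge, hnz⟩
      refine ⟨hv ▸ hnz, a, haR, Ne.symm hne, ?_⟩
      rw [← contarep_eq l a ha0 ha9, ← hv]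
      exact hge
    · rintro ⟨hM, j, hjR, hji, hge⟩
      rcases PySem.List.mem_pyRange_one.mp hjR with ⟨hj0, hj9⟩
      have hQ : pvQ l i j = true := by
        simp only [pvQ, Bool.and_eq_true, decide_eq_true_eq]
        refine ⟨Ne.symm hji, ?_, hv ▸ hM⟩
        rw [hv, contarep_eq l j hj0 hj9]
        exact hge
      intro hlen
      have : j ∈ (PySem.List.pyRange 0 9 1).filter (pvQ l i) := List.mem_filter.mpr ⟨hjR, hQ⟩
      rw [List.length_eq_zero_iff.mp hlen] at this
      cases this
  · simp [pvGood, hv]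

theorem pv_a_eq_spec (l : List Int) : relacinterval l = pvSpec l := by
  unfold relacinterval
  dsimp only
  have houter := PySem.List.foldl_congr_mem'
    (l := lisPosMaiores l) (init := ([] : List Int))
    (f := fun listapos cada =>
      (PySem.List.pyRange 0 9 1).foldl (fun listapos j =>
        if cada ≠ j then
          if PySem.List.pyGetD l cada 0 ≥ 2 * contarep l j ∧ PySem.List.pyGetD l cada 0 ≠ 0 then
            listapos ++ [cada + 1]
          else listapos
        else listapos) listapos)
    (g := fun listapos cada => listapos ++ List.replicate (pvRep l cada) (cada + 1))
    (by intro c _ a; exact pv_inner_eq l c a)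
  rw [houter, PySem.List.foldl_append_eq_flatMap, List.nil_append]
  unfold retiradup
  rw [pv_dedup_flatMap (lisPosMaiores l) (fun c => c + 1) (pvRep l) []
    ?hnd (by intro d _; rfl), List.nil_append]
  case hnd =>
    rw [lisPosMaiores_eq]
    exact (((PySem.List.nodup_pyRange_one 0 9).filter _).map (fun a b h => by omega))
  rw [lisPosMaiores_eq, List.filter_filter]
  unfold pvSpec
  refine congrArg _ (List.filter_congr ?_)
  intro i hiR
  rw [← pv_cond_eq l i]
  simp [Bool.and_comm]

-- ===== VERDICT (by name: the statement is the Claim_ definition above) =====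
theorem relacinterval_spec : Claim_equal_relacinterval := by
  intro l _ _
  unfold Spec_relacinterval
  rw [pv_a_eq_spec l, pv_alt_eq_spec l]
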